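-- pv_equiv track=rewrite | github.com/singharaj-usai/Python-DSAs | evenIndexMultiplier.py | evenIndexMultiplier
-- ===== SOURCE A (Python) =====
-- def evenIndexMultiplier(arr):
--     result = []
--     for index, number in enumerate(arr):
--         if index % 2 == 0:
--             result.append(number * 10)
--         else:
--             result.append(number)
--     return result
-- ===== SOURCE B (Python) =====
-- def evenIndexMultiplier(arr):
--     # Two-at-a-time pairing over an iterator: no index bookkeeping, no parity test.
--     result = []
--     it = iter(arr)
--     for x in it:
--         result.append(x * 10)
--         y = next(it, None)
--         if y is None:
--             break
--         result.append(y)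
--     return result
-- ===== Notes on version B (the rewrite author's own statement) =====
-- stated objective: alternative
-- what changed: Replaces the enumerate loop with a per-index parity branch by a two-at-a-time pairing loop over an iterator that never computes or tests an index.
import Mathlib
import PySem

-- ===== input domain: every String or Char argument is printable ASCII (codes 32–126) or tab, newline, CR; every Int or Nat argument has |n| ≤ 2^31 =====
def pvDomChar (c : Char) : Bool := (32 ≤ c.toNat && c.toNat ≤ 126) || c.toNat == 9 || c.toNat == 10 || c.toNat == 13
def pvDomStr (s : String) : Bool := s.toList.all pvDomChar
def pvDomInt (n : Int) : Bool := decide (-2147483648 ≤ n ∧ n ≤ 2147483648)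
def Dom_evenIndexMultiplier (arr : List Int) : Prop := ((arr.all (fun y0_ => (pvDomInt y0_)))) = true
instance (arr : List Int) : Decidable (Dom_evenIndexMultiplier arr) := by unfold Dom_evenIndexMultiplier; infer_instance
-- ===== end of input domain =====

-- B replaces A's enumerate loop with a per-index parity branch by a two-at-a-time
-- pairing loop over an iterator (objective: alternative decomposition, no speed claim).


-- ===== PORT A =====
-- for index, number in enumerate(arr): if index % 2 == 0: append(number*10) else: append(number)
def evenIndexMultiplier (arr : List Int) : List Int :=
  (PySem.List.enumerate arr).foldl
    (fun result p =>
      if PySem.Int.mod p.1 2 == 0 then result ++ [p.2 * 10] else result ++ [p.2])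
    []

-- ===== PORT B =====
-- for x in it: append(x*10); y = next(it, None); if y is None: break; append(y)
-- each iteration consumes x and (when present) y from the iterator:
def evenGo (result : List Int) (rest : List Int) : List Int :=
  match rest with
  | [] => result                            -- iterator exhausted before x
  | [x] => result ++ [x * 10]               -- y is None: append(x*10) then break
  | x :: y :: rest' => evenGo (result ++ [x * 10, y]) rest'

def evenIndexMultiplier_alt (arr : List Int) : List Int :=
  evenGo [] arr

-- ===== PRECONDITION & SPEC =====
def Spec_evenIndexMultiplier (arr : List Int) (out : List Int) : Prop := out = evenIndexMultiplier_alt arr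
instance (arr : List Int) (out : List Int) : Decidable (Spec_evenIndexMultiplier arr out) := by unfold Spec_evenIndexMultiplier; infer_instance

-- ===== CLAIM (what is proved, stated in full; the proofs are below) =====
def Claim_equal_evenIndexMultiplier : Prop := ∀ (arr : List Int), Dom_evenIndexMultiplier arr → Spec_evenIndexMultiplier arr (evenIndexMultiplier arr)

-- ===== LEMMAS AND PROOFS =====

-- common characterisation: pairwise structural recursion both programs compute
def core : List Int → List Int
  | [] => []
  | [x] => [x * 10]
  | x :: y :: t => x * 10 :: y :: core t

lemma evenGo_eq (rest result : List Int) : evenGo result rest = result ++ core rest := by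
  induction rest using core.induct generalizing result with
  | case1 => simp [evenGo, core]
  | case2 x => simp [evenGo, core]
  | case3 x y t ih => simp [evenGo, core, ih]

lemma foldA_eq (arr : List Int) (s : Int) (result : List Int) (hs : s % 2 = 0) :
    (PySem.List.enumerate arr s).foldl
      (fun result p =>
        if PySem.Int.mod p.1 2 == 0 then result ++ [p.2 * 10] else result ++ [p.2])
      result = result ++ core arr := by
  induction arr using core.induct generalizing s result with
  | case1 => simp [PySem.List.enumerate_nil, core]
  | case2 x =>
      have d1 : 2 ∣ s := by omega
      simp [PySem.List.enumerate_cons, PySem.List.enumerate_nil, core, d1]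
  | case3 x y t ih =>
      have h1 : (s + 1) % 2 ≠ 0 := by omega
      have d1 : 2 ∣ s := by omega
      have d2 : ¬ (2 ∣ (s + 1)) := by omega
      simp only [PySem.List.enumerate_cons, List.foldl_cons]
      rw [ih (s + 1 + 1) _ (by omega)]
      simp [d1, d2, core]

-- ===== VERDICT (by name: the statement is the Claim_ definition above) =====
theorem evenIndexMultiplier_spec : Claim_equal_evenIndexMultiplier := by
  intro arr _
  show evenIndexMultiplier arr = evenIndexMultiplier_alt arr
  rw [evenIndexMultiplier, evenIndexMultiplier_alt, evenGo_eq,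
    foldA_eq arr 0 [] rfl]
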